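-- pv_equiv track=rewrite | github.com/itripathiharsh/Sentiment_Analysis | App.py | get_chapter_and_verse_from_day
-- ===== SOURCE A (Python) =====
-- VERSE_COUNTS = [47, 72, 43, 42, 29, 47, 30, 28, 34, 42, 55, 20, 35, 27, 20, 24, 28, 78]
--
-- TOTAL_VERSES = sum(VERSE_COUNTS)
--
-- def get_chapter_and_verse_from_day(day_index):
--     """Maps a day number (1-700) to a specific chapter and verse."""
--     shlok_number = (day_index % TOTAL_VERSES)
--     if shlok_number == 0: shlok_number = TOTAL_VERSES
--
--     chapter = 1
--     verse_count_sum = 0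
--     for count in VERSE_COUNTS:
--         verse_count_sum += count
--         if shlok_number <= verse_count_sum:
--             verse = shlok_number - (verse_count_sum - count)
--             return chapter, verse
--         chapter += 1
--     return 18, 78 # Fallback to the last verse
-- ===== SOURCE B (Python) =====
-- VERSE_COUNTS = [47, 72, 43, 42, 29, 47, 30, 28, 34, 42, 55, 20, 35, 27, 20, 24, 28, 78]
--
-- TOTAL_VERSES = sum(VERSE_COUNTS)
--
-- _CUM = []
-- _t = 0
-- for _c in VERSE_COUNTS:
--     _t += _c
--     _CUM.append(_t)
--
-- def get_chapter_and_verse_from_day(day_index):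
--     """Maps a day number (1-700) to a specific chapter and verse."""
--     s = day_index % TOTAL_VERSES or TOTAL_VERSES
--     lo, hi = 0, len(_CUM) - 1
--     while lo < hi:
--         mid = (lo + hi) // 2
--         if _CUM[mid] < s:
--             lo = mid + 1
--         else:
--             hi = mid
--     return lo + 1, s - (_CUM[lo] - VERSE_COUNTS[lo])
-- ===== Notes on version B (the rewrite author's own statement) =====
-- stated objective: alternative
-- what changed: Replaces A's linear scan with accumulator over VERSE_COUNTS by a precomputed prefix-sum table and a hand-written binary search (bisect_left style) for the first cumulative count >= shlok number.
import Mathlib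
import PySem

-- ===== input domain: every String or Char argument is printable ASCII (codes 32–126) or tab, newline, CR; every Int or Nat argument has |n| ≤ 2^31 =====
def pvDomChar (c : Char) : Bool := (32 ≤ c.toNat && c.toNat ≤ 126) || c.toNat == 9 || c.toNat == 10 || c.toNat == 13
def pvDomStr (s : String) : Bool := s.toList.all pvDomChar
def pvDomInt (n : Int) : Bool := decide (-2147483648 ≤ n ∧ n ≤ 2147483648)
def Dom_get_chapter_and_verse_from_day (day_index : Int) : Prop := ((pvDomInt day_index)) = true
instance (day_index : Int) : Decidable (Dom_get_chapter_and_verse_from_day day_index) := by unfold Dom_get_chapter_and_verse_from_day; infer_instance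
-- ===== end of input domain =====

-- B replaces A's linear scan over VERSE_COUNTS by a precomputed prefix-sum table and a binary
-- search; same return value everywhere (objective: alternative algorithm).

-- ===== PORT A =====
def verseCounts : List Int := [47, 72, 43, 42, 29, 47, 30, 28, 34, 42, 55, 20, 35, 27, 20, 24, 28, 78]

def totalVerses : Int := verseCounts.sum

-- the for-loop of A: state (chapter, verse_count_sum), early return when shlok ≤ running sum
def gaLoop : List Int → Int → Int → Int → Int × Int
  | [], _, _, _ => (18, 78)  -- fallback to the last verse
  | count :: rest, shlok, chapter, vcs =>
    let vcs' := vcs + count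
    if shlok ≤ vcs' then (chapter, shlok - (vcs' - count))
    else gaLoop rest shlok (chapter + 1) vcs'

def get_chapter_and_verse_from_day (day_index : Int) : Int × Int :=
  let shlok0 := PySem.Int.mod day_index totalVerses
  let shlok := if shlok0 = 0 then totalVerses else shlok0
  gaLoop verseCounts shlok 1 0

-- ===== PORT B =====
def verseCountsB : List Int := [47, 72, 43, 42, 29, 47, 30, 28, 34, 42, 55, 20, 35, 27, 20, 24, 28, 78]

def totalVersesB : Int := verseCountsB.sum

-- the module-level prefix-sum table _CUM
def cumB : List Int := (verseCountsB.foldl (fun (acc : List Int × Int) c =>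
    let t := acc.2 + c; (acc.1 ++ [t], t)) ([], 0)).1

-- the while-loop binary search of B (lo, hi are nonnegative Python ints → Nat indices)
-- fuel = hi - lo bounds the iteration count; it only makes the recursion structural
def bsearchGo (cum : List Int) (s : Int) : Nat → Nat → Nat → Nat
  | 0, lo, _ => lo
  | fuel + 1, lo, hi =>
    if lo < hi then
      let mid := (lo + hi) / 2
      if cum.getD mid 0 < s then bsearchGo cum s fuel (mid + 1) hi
      else bsearchGo cum s fuel lo mid
    else lo

def bsearchB (cum : List Int) (s : Int) (lo hi : Nat) : Nat :=
  bsearchGo cum s (hi - lo) lo hi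

def get_chapter_and_verse_from_day_alt (day_index : Int) : Int × Int :=
  let m := PySem.Int.mod day_index totalVersesB
  let s := if m = 0 then totalVersesB else m
  let lo := bsearchB cumB s 0 (cumB.length - 1)
  ((lo : Int) + 1, s - (cumB.getD lo 0 - verseCountsB.getD lo 0))

-- ===== PRECONDITION & SPEC =====
def Spec_get_chapter_and_verse_from_day (day_index : Int) (out : Int × Int) : Prop := out = get_chapter_and_verse_from_day_alt day_index
instance (day_index : Int) (out : Int × Int) : Decidable (Spec_get_chapter_and_verse_from_day day_index out) := by unfold Spec_get_chapter_and_verse_from_day; infer_instance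

-- ===== CLAIM (what is proved, stated in full; the proofs are below) =====
def Claim_equal_get_chapter_and_verse_from_day : Prop := ∀ (day_index : Int), Dom_get_chapter_and_verse_from_day day_index → Spec_get_chapter_and_verse_from_day day_index (get_chapter_and_verse_from_day day_index)

-- ===== LEMMAS AND PROOFS =====

-- both programs agree for every shlok number 1..701 (finite check)
set_option maxRecDepth 20000 in
lemma agree_on_shlok : ∀ n : Nat, n < 701 →
    gaLoop verseCounts ((n : Int) + 1) 1 0 =
      (let s : Int := (n : Int) + 1
       let lo := bsearchB cumB s 0 (cumB.length - 1)
       ((lo : Int) + 1, s - (cumB.getD lo 0 - verseCountsB.getD lo 0))) := by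
  decide

lemma mod701_bounds (d : Int) : 0 ≤ PySem.Int.mod d 701 ∧ PySem.Int.mod d 701 < 701 := by
  rw [PySem.Int.mod_eq_emod_of_pos (by norm_num : (0:Int) < 701)]
  exact ⟨Int.emod_nonneg d (by norm_num), Int.emod_lt_of_pos d (by norm_num)⟩

lemma totalVerses_eq : totalVerses = 701 := by decide
lemma totalVersesB_eq : totalVersesB = 701 := by decide

-- ===== VERDICT (by name: the statement is the Claim_ definition above) =====
theorem get_chapter_and_verse_from_day_spec : Claim_equal_get_chapter_and_verse_from_day := by
  intro d _
  unfold Spec_get_chapter_and_verse_from_day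
  unfold get_chapter_and_verse_from_day get_chapter_and_verse_from_day_alt
  rw [totalVerses_eq, totalVersesB_eq]
  have hb := mod701_bounds d
  set m := PySem.Int.mod d 701 with hm
  have hs : (if m = 0 then (701 : Int) else m) = ((if m = 0 then (700 : Int) else m - 1).toNat : Int) + 1 := by
    split_ifs with h <;> omega
  simp only [hs]
  have hn : (if m = 0 then (700 : Int) else m - 1).toNat < 701 := by
    split_ifs with h <;> omega
  exact agree_on_shlok _ hn
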